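-- pv_equiv track=rewrite | github.com/yassinembasskar/EmailScraping | scrapping.py | replace_all
-- ===== SOURCE A (Python) =====
-- def split(splits):
--     y = '.'
--     result = []
--     for i in range(len(splits),0,-1):
--         array = []
--         first_array = splits[:i]
--         second_array = splits[i:]
--         array.append(y.join(first_array))
--         array.append(second_array)
--         result.append(array)
--     return result
--
-- def replace_all(splits,html_input):
--     keywords = split(splits)
--     for keyword in keywords:
--         find_keyword=html_input.find(keyword[0])
--         if find_keyword != -1:
--             html_input = html_input.replace(keyword[0],'(\w+)')
--             if len(keyword[1])!=0:
--                 html_input = replace_all(keyword[1],html_input)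
--             return html_input
--     return html_input
-- ===== SOURCE B (Python) =====
-- def replace_all(splits, html_input):
--     # Iterative version: an explicit worklist loop instead of the recursive
--     # helper-built candidate table of A.
--     while splits:
--         for i in range(len(splits), 0, -1):
--             prefix = '.'.join(splits[:i])
--             if html_input.find(prefix) != -1:
--                 html_input = html_input.replace(prefix, '(\w+)')
--                 splits = splits[i:]
--                 break
--         else:
--             return html_input
--     return html_input
-- ===== Notes on version B (the rewrite author's own statement) =====
-- stated objective: simpler
-- what changed: Replaces A's recursion plus the separate split() helper that materialises the whole (prefix, suffix) candidate table with a single self-contained iterative while-loop that builds each dotted prefix on demand and shrinks the worklist in place.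
import Mathlib
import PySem

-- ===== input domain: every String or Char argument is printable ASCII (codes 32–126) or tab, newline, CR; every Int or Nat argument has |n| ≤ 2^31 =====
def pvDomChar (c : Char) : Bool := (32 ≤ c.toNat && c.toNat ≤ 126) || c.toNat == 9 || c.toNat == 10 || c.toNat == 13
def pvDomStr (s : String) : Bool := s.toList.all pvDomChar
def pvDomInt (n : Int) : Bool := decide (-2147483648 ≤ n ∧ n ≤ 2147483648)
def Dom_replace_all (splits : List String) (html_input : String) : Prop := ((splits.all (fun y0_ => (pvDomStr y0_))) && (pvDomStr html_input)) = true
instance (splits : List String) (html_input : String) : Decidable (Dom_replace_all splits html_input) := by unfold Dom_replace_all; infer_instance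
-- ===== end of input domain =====

-- B replaces A's recursion + separate split() candidate-table helper by one iterative worklist loop; same return value everywhere.

-- ===== PORT A =====
-- helper `split`: builds [['.'.join(splits[:i]), splits[i:]] for i in range(len(splits),0,-1)]
def split_py (splits : List String) : List (String × List String) :=
  (PySem.List.pyRange (splits.length : Int) 0 (-1)).foldl
    (fun result i =>
      let first_array := PySem.List.slice splits none (some i)
      let second_array := PySem.List.slice splits (some i) none
      result ++ [(PySem.Str.join "." first_array, second_array)])
    []

-- the `for keyword in keywords` loop body of A (fuelRec is the recursive call)
def replace_all_go (fuelRec : List String → String → String) :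
    List (String × List String) → String → String
  | [], html_input => html_input
  | kw :: rest, html_input =>
    if PySem.Str.find html_input kw.1 ≠ -1 then
      let h2 := PySem.Str.replace html_input kw.1 "(\\w+)"
      if kw.2.length ≠ 0 then fuelRec kw.2 h2 else h2
    else replace_all_go fuelRec rest html_input

-- A's recursion, totalised with fuel; each recursive call strictly shrinks `splits`,
-- so fuel = splits.length + 1 always suffices (the fuel-0 branch is unreachable).
def replace_all_fuel : Nat → List String → String → String
  | 0, _, html_input => html_input
  | fuel+1, splits, html_input => replace_all_go (replace_all_fuel fuel) (split_py splits) html_input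

def replace_all (splits : List String) (html_input : String) : String :=
  replace_all_fuel (splits.length + 1) splits html_input

-- ===== PORT B =====
-- inner `for i in range(len(splits),0,-1)` scan: first i whose dotted prefix occurs
def alt_scan (splits : List String) (html : String) : Nat → Option Nat
  | 0 => none
  | j+1 =>
    if PySem.Str.find html (PySem.Str.join "." (splits.take (j+1))) ≠ -1 then some (j+1)
    else alt_scan splits html j

theorem alt_scan_pos (splits : List String) (html : String) :
    ∀ n i, alt_scan splits html n = some i → 0 < i := by
  intro n
  induction n with
  | zero => intro i h; simp [alt_scan] at h
  | succ j ih =>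
    intro i h
    simp only [alt_scan] at h
    split at h
    · simp only [Option.some.injEq] at h; omega
    · exact ih i h

-- the `while splits:` loop of B
def replace_all_alt (splits : List String) (html_input : String) : String :=
  match splits with
  | [] => html_input
  | s :: rest =>
    match hscan : alt_scan (s :: rest) html_input (rest.length + 1) with
    | none => html_input
    | some i =>
      replace_all_alt ((s :: rest).drop i)
        (PySem.Str.replace html_input (PySem.Str.join "." ((s :: rest).take i)) "(\\w+)")
termination_by splits.length
decreasing_by
  have hi := alt_scan_pos (s :: rest) html_input (rest.length + 1) i hscan
  simp [List.length_drop]; omega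

-- ===== PRECONDITION & SPEC =====
def Spec_replace_all (splits : List String) (html_input : String) (out : String) : Prop := out = replace_all_alt splits html_input
instance (splits : List String) (html_input : String) (out : String) : Decidable (Spec_replace_all splits html_input out) := by unfold Spec_replace_all; infer_instance

-- ===== CLAIM (what is proved, stated in full; the proofs are below) =====
def Claim_equal_replace_all : Prop := ∀ (splits : List String) (html_input : String), Dom_replace_all splits html_input → Spec_replace_all splits html_input (replace_all splits html_input)

-- ===== LEMMAS AND PROOFS =====

-- descending candidate list [(prefix n, suffix n), …, (prefix 1, suffix 1)]
def kwList (splits : List String) : Nat → List (String × List String)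
  | 0 => []
  | i+1 => (PySem.Str.join "." (splits.take (i+1)), splits.drop (i+1)) :: kwList splits i

theorem foldl_append_singleton {α β : Type} (g : α → β) :
    ∀ (l : List α) (acc : List β),
      l.foldl (fun r i => r ++ [g i]) acc = acc ++ l.map g := by
  intro l
  induction l with
  | nil => simp
  | cons x xs ih => intro acc; simp [List.foldl, ih, List.append_assoc]

theorem pyRange_desc (n : Nat) :
    PySem.List.pyRange (n : Int) 0 (-1)
      = (List.range n).map (fun k : Nat => (n : Int) - (k : Int)) := by
  have hstep : ¬ ((-1 : Int) = 0) := by norm_num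
  have hnotpos : ¬ ((0 : Int) < -1) := by norm_num
  simp only [PySem.List.pyRange, if_neg hstep, if_neg hnotpos]
  by_cases h : (0 : Int) < (n : Int)
  · rw [if_pos h]
    have hcount : (((n : Int) - 0 + -(-1) - 1) / -(-1)).toNat = n := by norm_num
    rw [hcount]
    apply List.map_congr_left
    intro k _; ring
  · rw [if_neg h]
    have hn : n = 0 := by omega
    subst hn; simp

theorem map_desc_eq_kwList (splits : List String) :
    ∀ n : Nat, (List.map (fun k : Nat => (n : Int) - (k : Int)) (List.range n)).map
        (fun i => (PySem.Str.join "." (PySem.List.slice splits none (some i)),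
                   PySem.List.slice splits (some i) none))
      = kwList splits n := by
  intro n
  induction n with
  | zero => simp [kwList]
  | succ m ih =>
    rw [List.range_succ_eq_map]
    simp only [List.map_cons, List.map_map, Nat.cast_zero, sub_zero, kwList]
    congr 1
    · rw [PySem.List.slice_to_natCast, PySem.List.slice_from_natCast]
    · rw [← ih, List.map_map]
      apply List.map_congr_left
      intro k _
      simp only [Function.comp_apply]
      have harg : ((m + 1 : Nat) : Int) - ((Nat.succ k : Nat) : Int) = (m : Int) - (k : Int) := by
        push_cast; ring
      rw [harg]
  -- end

theorem split_py_eq (splits : List String) :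
    split_py splits = kwList splits splits.length := by
  unfold split_py
  rw [pyRange_desc, foldl_append_singleton
    (g := fun i => (PySem.Str.join "." (PySem.List.slice splits none (some i)),
                    PySem.List.slice splits (some i) none))]
  rw [List.nil_append]
  exact map_desc_eq_kwList splits splits.length

theorem go_scan (splits : List String) (fuelRec : List String → String → String) :
    ∀ n html,
      replace_all_go fuelRec (kwList splits n) html =
        match alt_scan splits html n with
        | none => html
        | some i =>
          let h2 := PySem.Str.replace html (PySem.Str.join "." (splits.take i)) "(\\w+)"
          if (splits.drop i).length ≠ 0 then fuelRec (splits.drop i) h2 else h2 := by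
  intro n
  induction n with
  | zero => intro html; rfl
  | succ j ih =>
    intro html
    simp only [kwList, alt_scan, replace_all_go]
    split
    · rfl
    · exact ih html

theorem fuel_correct :
    ∀ fuel splits html, splits.length < fuel →
      replace_all_fuel fuel splits html = replace_all_alt splits html := by
  intro fuel
  induction fuel with
  | zero => intro splits html h; omega
  | succ f ih =>
    intro splits html h
    rw [replace_all_fuel, split_py_eq, go_scan]
    match splits with
    | [] => simp [alt_scan, replace_all_alt]
    | s :: rest =>
      rw [replace_all_alt]
      simp only [List.length_cons]
      cases hscan : alt_scan (s :: rest) html (rest.length + 1) with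
      | none => rfl
      | some i =>
        have hi := alt_scan_pos (s :: rest) html (rest.length + 1) i hscan
        simp only []
        by_cases hdrop : ((s :: rest).drop i).length ≠ 0
        · rw [if_pos hdrop, ih]
          simp only [List.length_drop, List.length_cons] at *
          omega
        · rw [if_neg hdrop]
          have hlen : ((s :: rest).drop i).length = 0 := by omega
          have hnil : (s :: rest).drop i = [] := List.eq_nil_of_length_eq_zero hlen
          rw [hnil, replace_all_alt]

-- ===== VERDICT (by name: the statement is the Claim_ definition above) =====
theorem replace_all_spec : Claim_equal_replace_all := by
  intro splits html _
  unfold Spec_replace_all replace_all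
  exact fuel_correct (splits.length + 1) splits html (by omega)
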